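-- pv_equiv track=rewrite | github.com/waqarbaig6133/basicPythonProjects | StringMatch.py | thing
-- ===== SOURCE A (Python) =====
-- def thing(s1, s2):
--     s = list(s1)
--     thing = []
--     for x in enumerate(s):
--         t = s.copy()
--         t.pop(x[0])
--         if ''.join(t) == s2:
--             thing.append(x[0])
--     return thing
-- ===== SOURCE B (Python) =====
-- def thing(s1, s2):
--     n = len(s1)
--     if n != len(s2) + 1:
--         return []
--     p = 0
--     while p < n - 1 and s1[p] == s2[p]:
--         p += 1
--     suf = 0
--     while suf < n - 1 and s1[n - 1 - suf] == s2[n - 2 - suf]: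
--         suf += 1
--     return list(range(n - 1 - suf, p + 1))
-- ===== Notes on version B (the rewrite author's own statement) =====
-- stated objective: faster
-- what changed: A tries every deletion index, copying the whole list and re-joining it for each index (quadratic); B computes the longest common prefix and suffix of s1 and s2 once and returns the valid indices as the single contiguous range [n-1-suf, p].
import Mathlib
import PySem

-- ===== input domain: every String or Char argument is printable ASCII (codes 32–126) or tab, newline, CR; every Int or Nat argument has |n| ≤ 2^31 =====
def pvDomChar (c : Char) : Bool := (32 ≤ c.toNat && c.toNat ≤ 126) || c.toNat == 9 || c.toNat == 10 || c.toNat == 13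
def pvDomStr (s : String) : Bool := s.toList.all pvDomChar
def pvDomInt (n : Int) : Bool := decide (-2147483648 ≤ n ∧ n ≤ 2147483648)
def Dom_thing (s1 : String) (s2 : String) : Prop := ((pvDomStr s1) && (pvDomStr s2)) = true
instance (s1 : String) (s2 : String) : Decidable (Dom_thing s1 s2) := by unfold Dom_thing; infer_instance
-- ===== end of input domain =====

-- B replaces A's quadratic try-every-deletion scan by a prefix/suffix common-match computation and
-- returns the valid indices as one contiguous range (objective: faster, asymptotic O(n) vs O(n^2)).

-- ===== PORT A =====
-- for x in enumerate(s): t = s.copy(); t.pop(x[0]); if ''.join(t) == s2: thing.append(x[0])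
-- (''.join(t) == s2 is compared on code points: t == s2.toList; t.pop(i) is PySem.List.pop?,
--  the index from enumerate is always in range so the none branch is unreachable)
def thing (s1 : String) (s2 : String) : List Int :=
  let s := s1.toList
  (PySem.List.enumerate s).foldl (fun acc x =>
    match PySem.List.pop? s x.1 with
    | some (_, t) => if t == s2.toList then acc ++ [x.1] else acc
    | none => acc) []

-- ===== PORT B =====
-- the 'while p < n-1 and s1[p] == s2[p]' scan of Source B: longest common prefix length
-- (it stops at min(len a, len b) = n-1 exactly as the while condition does)
def lcpLen : List Char → List Char → Nat
  | x :: xs, y :: ys => if x = y then lcpLen xs ys + 1 else 0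
  | _, _ => 0

-- the suffix scan of Source B ('s1[n-1-suf] == s2[n-2-suf]') is the prefix scan on the reversed strings
def thing_alt (s1 : String) (s2 : String) : List Int :=
  if s1.toList.length ≠ s2.toList.length + 1 then []
  else
    PySem.List.pyRange
      ((s1.toList.length - 1 - lcpLen s1.toList.reverse s2.toList.reverse : Nat) : Int)
      (((lcpLen s1.toList s2.toList : Nat) : Int) + 1) 1

-- ===== PRECONDITION & SPEC =====
def Spec_thing (s1 : String) (s2 : String) (out : List Int) : Prop := out = thing_alt s1 s2
instance (s1 : String) (s2 : String) (out : List Int) : Decidable (Spec_thing s1 s2 out) := by unfold Spec_thing; infer_instance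

-- ===== CLAIM (what is proved, stated in full; the proofs are below) =====
def Claim_equal_thing : Prop := ∀ (s1 : String) (s2 : String), Dom_thing s1 s2 → Spec_thing s1 s2 (thing s1 s2)

-- ===== LEMMAS AND PROOFS =====

theorem lcpLen_le_right (a b : List Char) : lcpLen a b ≤ b.length := by
  induction a generalizing b with
  | nil => cases b <;> simp [lcpLen]
  | cons x xs ih =>
    cases b with
    | nil => simp [lcpLen]
    | cons y ys =>
      simp only [lcpLen, List.length_cons]
      split
      · exact Nat.succ_le_succ (ih ys)
      · omega

theorem take_eq_iff_le_lcpLen (a b : List Char) (k : Nat)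
    (ha : k ≤ a.length) (hb : k ≤ b.length) :
    a.take k = b.take k ↔ k ≤ lcpLen a b := by
  induction a generalizing b k with
  | nil =>
    simp at ha; subst ha; simp
  | cons x xs ih =>
    cases b with
    | nil => simp at hb; subst hb; simp
    | cons y ys =>
      cases k with
      | zero => simp
      | succ k' =>
        simp only [List.take_succ_cons, List.cons.injEq, lcpLen]
        split
        · next hxy =>
          subst hxy
          simp only [true_and]
          rw [ih ys k' (by simpa using ha) (by simpa using hb)]
          omega
        · next hxy =>
          simp only [hxy, false_and, false_iff]
          omega

-- the key characterisation: deleting index k of a yields b iff k lies in the prefix/suffix window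
theorem eraseIdx_eq_iff (a b : List Char) (k : Nat)
    (hlen : a.length = b.length + 1) (hk : k < a.length) :
    a.eraseIdx k = b ↔ (k ≤ lcpLen a b ∧ a.length - 1 - lcpLen a.reverse b.reverse ≤ k) := by
  have hk' : k ≤ b.length := by omega
  have h1 : a.eraseIdx k = List.take k a ++ List.drop (k + 1) a :=
    List.eraseIdx_eq_take_drop_succ a k
  have h2 : b = List.take k b ++ List.drop k b := (List.take_append_drop k b).symm
  have hlt : (List.take k a).length = (List.take k b).length := by
    simp [List.length_take]; omega
  have hsplit : a.eraseIdx k = b ↔ (List.take k a = List.take k b ∧ List.drop (k+1) a = List.drop k b) := by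
    rw [h1]
    constructor
    · intro h
      have := List.append_inj (h.trans h2) (by simp [List.length_take]; omega)
      exact ⟨this.1, this.2⟩
    · rintro ⟨ht, hd⟩; rw [ht, hd]; exact (List.take_append_drop k b)
  rw [hsplit]
  rw [take_eq_iff_le_lcpLen a b k (by omega) hk']
  have hdrop : List.drop (k+1) a = List.drop k b ↔
      (a.reverse.take (a.length - 1 - k) = b.reverse.take (a.length - 1 - k)) := by
    rw [← List.reverse_inj, List.reverse_drop, List.reverse_drop,
        (show a.length - (k+1) = a.length - 1 - k by omega),
        (show b.length - k = a.length - 1 - k by omega)]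
  rw [hdrop]
  rw [take_eq_iff_le_lcpLen a.reverse b.reverse (a.length - 1 - k)
        (by simp; omega) (by simp; omega)]
  constructor
  · rintro ⟨h1, h2⟩; exact ⟨h1, by omega⟩
  · rintro ⟨h1, h2⟩
    refine ⟨h1, ?_⟩
    have := lcpLen_le_right a.reverse b.reverse
    simp at this
    omega

-- A's fold as a filtered map over the enumeration
theorem thing_eq_filter (s1 s2 : String) :
    thing s1 s2 =
      ((PySem.List.enumerate s1.toList).filter
        (fun x => (s1.toList.eraseIdx x.1.toNat) == s2.toList)).map (·.1) := by
  unfold thing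
  rw [PySem.List.foldl_congr_mem _ _
      (fun (acc : List Int) (x : Int × Char) =>
        if (s1.toList.eraseIdx x.1.toNat) == s2.toList then acc ++ [x.1] else acc) _ ?_]
  · rw [PySem.List.foldl_append_if
      (fun (x : Int × Char) => (s1.toList.eraseIdx x.1.toNat) == s2.toList)
      (fun (x : Int × Char) => x.1)]
    simp
  · intro acc x hx
    rw [PySem.List.mem_enumerate_iff] at hx
    obtain ⟨k, hklt, rfl⟩ := hx
    simp only [Int.zero_add]
    rw [PySem.List.pop?_natCast _ k hklt]
    simp

theorem mem_thing_iff (s1 s2 : String) (i : Int) :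
    i ∈ thing s1 s2 ↔
      ∃ k : Nat, k < s1.toList.length ∧ i = (k : Int) ∧ s1.toList.eraseIdx k = s2.toList := by
  rw [thing_eq_filter]
  simp only [List.mem_map, List.mem_filter]
  constructor
  · rintro ⟨x, ⟨hx, hcond⟩, rfl⟩
    rw [PySem.List.mem_enumerate_iff] at hx
    obtain ⟨k, hklt, rfl⟩ := hx
    refine ⟨k, hklt, by simp, ?_⟩
    simp only [Int.zero_add] at hcond
    simpa using hcond
  · rintro ⟨k, hklt, rfl, herase⟩
    refine ⟨((k : Int), s1.toList[k]), ⟨?_, ?_⟩, rfl⟩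
    · rw [PySem.List.mem_enumerate_iff]; exact ⟨k, hklt, by simp⟩
    · simpa using herase

theorem pairwise_thing (s1 s2 : String) : (thing s1 s2).Pairwise (· < ·) := by
  rw [thing_eq_filter]
  exact List.Pairwise.map _ (fun _ _ h => h)
    ((PySem.List.pairwise_lt_enumerate s1.toList 0).filter _)

theorem pairwise_pyRange_one (a b : Int) : (PySem.List.pyRange a b 1).Pairwise (· < ·) := by
  rw [PySem.List.pyRange_of_pos a b (by omega)]
  refine List.pairwise_map.mpr (List.Pairwise.imp ?_ List.pairwise_lt_range)
  intro p q h
  omega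

theorem pairwise_thing_alt (s1 s2 : String) : (thing_alt s1 s2).Pairwise (· < ·) := by
  unfold thing_alt
  split
  · exact List.Pairwise.nil
  · exact pairwise_pyRange_one _ _

theorem mem_thing_alt_iff (s1 s2 : String) (i : Int) :
    i ∈ thing_alt s1 s2 ↔
      s1.toList.length = s2.toList.length + 1 ∧
      ((s1.toList.length - 1 - lcpLen s1.toList.reverse s2.toList.reverse : Nat) : Int) ≤ i ∧
      i < ((lcpLen s1.toList s2.toList : Nat) : Int) + 1 := by
  unfold thing_alt
  split
  · next h =>
    simp only [List.not_mem_nil, false_iff]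
    rintro ⟨hc, -, -⟩
    exact h hc
  · next h =>
    rw [PySem.List.mem_pyRange_one]
    constructor
    · rintro ⟨h1, h2⟩; exact ⟨by omega, h1, h2⟩
    · rintro ⟨_, h1, h2⟩; exact ⟨h1, h2⟩

theorem mem_iff_mem (s1 s2 : String) (i : Int) : i ∈ thing s1 s2 ↔ i ∈ thing_alt s1 s2 := by
  rw [mem_thing_iff, mem_thing_alt_iff]
  constructor
  · rintro ⟨k, hklt, rfl, herase⟩
    have hlen : s1.toList.length = s2.toList.length + 1 := by
      have := congrArg List.length herase
      rw [List.length_eraseIdx_of_lt hklt] at this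
      omega
    rw [eraseIdx_eq_iff _ _ k hlen hklt] at herase
    refine ⟨hlen, ?_, ?_⟩ <;> [exact_mod_cast Int.ofNat_le.mpr herase.2; exact_mod_cast (by omega : (k:Int) < (lcpLen s1.toList s2.toList : Nat) + 1)]
  · rintro ⟨hlen, hlo, hhi⟩
    have hi0 : 0 ≤ i := le_trans (Int.natCast_nonneg _) hlo
    obtain ⟨k, rfl⟩ := Int.eq_ofNat_of_zero_le hi0
    have hp := lcpLen_le_right s1.toList s2.toList
    have hklt : k < s1.toList.length := by
      have : (k : Int) < (lcpLen s1.toList s2.toList : Nat) + 1 := hhi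
      have hk : k ≤ lcpLen s1.toList s2.toList := by exact_mod_cast Int.lt_add_one_iff.mp this
      omega
    refine ⟨k, hklt, rfl, ?_⟩
    rw [eraseIdx_eq_iff _ _ k hlen hklt]
    constructor
    · exact_mod_cast Int.lt_add_one_iff.mp hhi
    · exact_mod_cast hlo

-- ===== VERDICT (by name: the statement is the Claim_ definition above) =====
theorem thing_spec : Claim_equal_thing := by
  intro s1 s2 _
  unfold Spec_thing
  have hperm : (thing s1 s2).Perm (thing_alt s1 s2) := by
    have h1 : (thing s1 s2).Nodup :=
      (pairwise_thing s1 s2).imp (fun h => ne_of_lt h)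
    have h2 : (thing_alt s1 s2).Nodup :=
      (pairwise_thing_alt s1 s2).imp (fun h => ne_of_lt h)
    exact List.Subperm.antisymm
      (List.subperm_of_subset h1 (fun x hx => (mem_iff_mem s1 s2 x).mp hx))
      (List.subperm_of_subset h2 (fun x hx => (mem_iff_mem s1 s2 x).mpr hx))
  exact hperm.eq_of_pairwise (fun a b _ _ h1 h2 => by omega) (pairwise_thing s1 s2) (pairwise_thing_alt s1 s2)
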